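-- pv_equiv track=rewrite | github.com/blackcoster/Algorythms | Tinkoff/4.py | boring
-- ===== SOURCE A (Python) =====
-- def boring(lis):
--     dicta = {num: lis.count(num) for num in lis}
--
--     if len(set(lis)) == len(lis):
--         return True
--
--     values = list(dicta.values())
--     if 1 in values:
--         values.remove(1)
--         if len(set(values)) == 1:
--             return True
--         elif len(set(values)) == 0:
--             return True
--         else:
--             values.append(1)
--
--     maximum = max(values)
--     values[values.index(maximum)] -= 1
--
--     if len(set(values)) == 1:
--         return True
--     elif len(set(values)) == 0:
--         return True
--     else:
--         return False
-- ===== SOURCE B (Python) =====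
-- def boring(lis):
--     counts = {}
--     for x in lis:
--         counts[x] = counts.get(x, 0) + 1
--     if not lis:
--         return True
--     for v in counts:
--         remaining = {counts[k] - (1 if k == v else 0) for k in counts}
--         remaining.discard(0)
--         if len(remaining) <= 1:
--             return True
--     return False
-- ===== Notes on version B (the rewrite author's own statement) =====
-- stated objective: simpler
-- what changed: Instead of A's two targeted mutations (remove a 1-count, then decrement the first maximum of the values list), B builds the counts in one pass and uniformly tries every distinct value as the removal candidate, checking whether the remaining frequencies (dropping a key that reaches 0) are all equal.
import Mathlib
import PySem

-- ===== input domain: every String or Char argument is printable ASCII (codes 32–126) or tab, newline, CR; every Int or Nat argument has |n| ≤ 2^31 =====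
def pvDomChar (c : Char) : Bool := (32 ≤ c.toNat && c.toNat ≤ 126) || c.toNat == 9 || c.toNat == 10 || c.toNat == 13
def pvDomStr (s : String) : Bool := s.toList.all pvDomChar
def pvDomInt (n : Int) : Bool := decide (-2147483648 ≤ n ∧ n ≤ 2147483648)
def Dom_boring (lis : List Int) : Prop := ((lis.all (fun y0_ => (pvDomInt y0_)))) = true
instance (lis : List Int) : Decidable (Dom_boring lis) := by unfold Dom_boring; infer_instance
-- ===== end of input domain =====

-- B replaces A's two targeted mutations (remove a 1-count, decrement the first maximum) by a uniform
-- try-every-removal-candidate loop over the counter; objective: simpler.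

-- ===== PORT A =====
-- boringDec is the fall-through tail of A: `maximum = max(values); values[values.index(maximum)] -= 1; ...`
-- (the `none` arms are where Python's max()/index() would raise; they are unreachable: values is nonempty
-- and contains its maximum whenever this code runs, so A is total)
def boringDec (values : List Int) : Bool :=
  match PySem.List.max? values (fun x => x) with
  | none => false
  | some maximum =>
    match PySem.List.index? values maximum with
    | none => false
    | some i =>
      let values := PySem.List.pySetD values (i : Int) (PySem.List.pyGetD values (i : Int) 0 - 1)
      if PySem.Set.len (PySem.Set.ofList values) == 1 then true
      else if PySem.Set.len (PySem.Set.ofList values) == 0 then true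
      else false

def boring (lis : List Int) : Bool :=
  let dicta := lis.foldl (fun d num => d.insert num ((PySem.List.count lis num : Int))) PySem.Dict.empty
  if PySem.Set.len (PySem.Set.ofList lis) == (lis.length : Int) then true
  else
    let values := dicta.values
    if values.contains 1 then
      match PySem.List.remove? values 1 with
      | none => false
      | some values' =>
        if PySem.Set.len (PySem.Set.ofList values') == 1 then true
        else if PySem.Set.len (PySem.Set.ofList values') == 0 then true
        else boringDec (values' ++ [1])
    else boringDec values

def boring_alt (lis : List Int) : Bool :=
  let counts : PySem.Dict Int Int := lis.foldl (fun d x => d.insert x (d.getD x 0 + 1)) PySem.Dict.empty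
  if lis.isEmpty then true
  else
    counts.keys.any (fun v =>
      let remaining := PySem.Set.discard
        (PySem.Set.ofList (counts.keys.map (fun k => counts.getD k 0 - (if k == v then 1 else 0)))) 0
      decide (PySem.Set.len remaining ≤ 1))


-- ===== PRECONDITION & SPEC =====
def Spec_boring (lis : List Int) (out : Bool) : Prop := out = boring_alt lis
instance (lis : List Int) (out : Bool) : Decidable (Spec_boring lis out) := by unfold Spec_boring; infer_instance

-- ===== CLAIM (what is proved, stated in full; the proofs are below) =====
def Claim_equal_boring : Prop := ∀ (lis : List Int), Dom_boring lis → Spec_boring lis (boring lis)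

-- ===== LEMMAS AND PROOFS =====

-- len(set(l)) <= 1, i.e. all elements of l equal
def pvSmall (l : List Int) : Prop := ∀ x ∈ l, ∀ y ∈ l, x = y
-- len(set(l) - {0}) <= 1, i.e. all nonzero elements of l equal
def pvSmallNZ (l : List Int) : Prop := ∀ x ∈ l, x ≠ 0 → ∀ y ∈ l, y ≠ 0 → x = y
-- some single decrement of the frequency list makes all nonzero entries equal (B's search, index form)
def pvB (vs : List Int) : Prop := ∃ i, ∃ _ : i < vs.length, pvSmallNZ (vs.set i (vs[i] - 1))

theorem pvLenLeOne (s : List Int) (hn : s.Nodup) :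
    s.length ≤ 1 ↔ ∀ x ∈ s, ∀ y ∈ s, x = y := by
  match s with
  | [] => simp
  | [a] => simp
  | a :: b :: t =>
    simp only [List.length_cons] at *
    constructor
    · omega
    · intro h
      have : a = b := h a (by simp) b (by simp)
      simp [List.nodup_cons] at hn
      exact absurd this (by tauto)

theorem pvSmall_iff (l : List Int) :
    (PySem.Set.ofList l).length ≤ 1 ↔ (∀ x ∈ l, ∀ y ∈ l, x = y) := by
  rw [pvLenLeOne _ (PySem.Set.nodup_ofList l)]
  constructor
  · intro h x hx y hy
    exact h x ((PySem.Set.mem_ofList l x).2 hx) y ((PySem.Set.mem_ofList l y).2 hy)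
  · intro h x hx y hy
    exact h x ((PySem.Set.mem_ofList l x).1 hx) y ((PySem.Set.mem_ofList l y).1 hy)

theorem pvSmallNZ_iff (l : List Int) :
    ((PySem.Set.ofList l).discard 0).length ≤ 1 ↔
      (∀ x ∈ l, x ≠ 0 → ∀ y ∈ l, y ≠ 0 → x = y) := by
  rw [pvLenLeOne _ (PySem.Set.nodup_discard _ 0 (PySem.Set.nodup_ofList l))]
  constructor
  · intro h x hx hx0 y hy hy0
    exact h x ((PySem.Set.mem_discard _ 0 x).2 ⟨(PySem.Set.mem_ofList l x).2 hx, hx0⟩)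
            y ((PySem.Set.mem_discard _ 0 y).2 ⟨(PySem.Set.mem_ofList l y).2 hy, hy0⟩)
  · intro h x hx y hy
    obtain ⟨hx, hx0⟩ := (PySem.Set.mem_discard _ 0 x).1 hx
    obtain ⟨hy, hy0⟩ := (PySem.Set.mem_discard _ 0 y).1 hy
    exact h x ((PySem.Set.mem_ofList l x).1 hx) hx0 y ((PySem.Set.mem_ofList l y).1 hy) hy0

theorem pvSet_perm (l : List Int) (i : Nat) (h : i < l.length) (w : Int) :
    List.Perm (l.set i w) (w :: l.eraseIdx i) := by
  rw [List.set_eq_take_cons_drop w h, List.eraseIdx_eq_take_drop_succ]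
  exact List.perm_middle

theorem pvEraseIdx_perm (l : List Int) (i : Nat) (h : i < l.length) :
    List.Perm (l.eraseIdx i) (l.erase l[i]) := by
  have h1 : List.Perm l (l[i] :: l.eraseIdx i) := by
    have := pvSet_perm l i h l[i]
    rwa [List.set_getElem_self h] at this
  have h2 : List.Perm l (l[i] :: l.erase l[i]) := List.perm_cons_erase (List.getElem_mem h)
  exact (h1.symm.trans h2).cons_inv

theorem pvOfList_sublist (l : List Int) : (PySem.Set.ofList l).Sublist l := by
  induction l with
  | nil => simp [PySem.Set.ofList]
  | cons x xs ih =>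
    rw [PySem.Set.ofList_cons]
    refine List.Sublist.cons₂ x ?_
    refine List.Sublist.trans ?_ ih
    have : ((PySem.Set.ofList xs).discard x).Sublist (PySem.Set.ofList xs) := by
      simp only [PySem.Set.discard]
      exact List.filter_sublist
    exact this

theorem pvNodup_of_len (l : List Int) (h : (PySem.Set.ofList l).length = l.length) :
    l.Nodup := by
  have := (pvOfList_sublist l).eq_of_length h
  rw [← this]
  exact PySem.Set.nodup_ofList l

theorem pvGetD_foldl_insert_const (g : Int → Int) (l : List Int) (d : PySem.Dict Int Int) (k : Int) :
    (l.foldl (fun d x => d.insert x (g x)) d).getD k 0 =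
      if k ∈ l then g k else d.getD k 0 := by
  induction l generalizing d with
  | nil => simp
  | cons x xs ih =>
    simp only [List.foldl_cons, ih, PySem.Dict.getD_insert, List.mem_cons]
    by_cases hk : k ∈ xs
    · simp [hk]
    · by_cases hx : k = x <;> simp [hk, hx]


theorem pvSmallNZ_perm {l l' : List Int} (h : List.Perm l l') : pvSmallNZ l ↔ pvSmallNZ l' := by
  unfold pvSmallNZ
  constructor <;> intro hs x hx hx0 y hy hy0
  · exact hs x (h.mem_iff.2 hx) hx0 y (h.mem_iff.2 hy) hy0
  · exact hs x (h.mem_iff.1 hx) hx0 y (h.mem_iff.1 hy) hy0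

-- vs.set i (w), vs[i] = v: permutation with w :: vs.erase v
theorem pvSet_perm_erase (vs : List Int) (i : Nat) (h : i < vs.length) (w : Int) :
    List.Perm (vs.set i w) (w :: vs.erase vs[i]) :=
  (pvSet_perm vs i h w).trans ((pvEraseIdx_perm vs i h).cons w)

theorem pvB_of_small_erase (vs : List Int) (h1m : (1:Int) ∈ vs)
    (hs : pvSmall (vs.erase 1)) : pvB vs := by
  have hlt : List.idxOf 1 vs < vs.length := List.idxOf_lt_length_of_mem h1m
  refine ⟨List.idxOf 1 vs, hlt, ?_⟩
  have hgi : vs[List.idxOf 1 vs]'hlt = 1 := List.getElem_idxOf _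
  have hp := pvSet_perm_erase vs (List.idxOf 1 vs) hlt (vs[List.idxOf 1 vs]'hlt - 1)
  rw [hgi] at hp
  simp only [hgi]
  rw [pvSmallNZ_perm hp]
  intro x hx hx0 y hy hy0
  rcases List.mem_cons.1 hx with hx | hx
  · omega
  rcases List.mem_cons.1 hy with hy | hy
  · omega
  exact hs x hx y hy

theorem pvB_of_dec (vs l : List Int) (hperm : List.Perm l vs) (m : Int) (i : Nat)
    (hil : i < l.length) (hgi : l[i] = m) (hs : pvSmall (l.set i (m - 1))) : pvB vs := by
  have hmv : m ∈ vs := hperm.mem_iff.1 (hgi ▸ List.getElem_mem hil)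
  have hlt : List.idxOf m vs < vs.length := List.idxOf_lt_length_of_mem hmv
  refine ⟨List.idxOf m vs, hlt, ?_⟩
  have hgj : vs[List.idxOf m vs]'hlt = m := List.getElem_idxOf _
  have hp1 := pvSet_perm_erase vs (List.idxOf m vs) hlt (m - 1)
  rw [hgj] at hp1
  have hp2 := pvSet_perm_erase l i hil (m - 1)
  rw [hgi] at hp2
  have hp : List.Perm (vs.set (List.idxOf m vs) (m - 1)) (l.set i (m - 1)) :=
    hp1.trans (((hperm.erase m).symm.cons (m-1)).trans hp2.symm)
  simp only [hgj]
  rw [pvSmallNZ_perm hp]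
  intro x hx _ y hy _
  exact hs x hx y hy

theorem pvNotNZ_of_not_small_erase (vs : List Int) (i : Nat) (h : i < vs.length)
    (hv1 : vs[i] = 1) (hall : ∀ x ∈ vs, 1 ≤ x)
    (hns : ¬ pvSmall (vs.erase 1)) : ¬ pvSmallNZ (vs.set i (vs[i] - 1)) := by
  unfold pvSmall at hns
  push Not at hns
  obtain ⟨x, hx, y, hy, hxy⟩ := hns
  have hp := pvSet_perm_erase vs i h (vs[i] - 1)
  rw [hv1] at hp ⊢
  rw [pvSmallNZ_perm hp]
  have hx1 : 1 ≤ x := hall x (List.mem_of_mem_erase hx)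
  have hy1 : 1 ≤ y := hall y (List.mem_of_mem_erase hy)
  intro hsm
  exact hxy (hsm x (List.mem_cons_of_mem _ hx) (by omega) y (List.mem_cons_of_mem _ hy) (by omega))

theorem pvNotNZ_of_not_small_decmax (vs l : List Int) (hperm : List.Perm l vs) (m : Int)
    (il : Nat) (hil : il < l.length) (hgl : l[il] = m) (hm2 : 2 ≤ m)
    (hall : ∀ x ∈ vs, 1 ≤ x) (hns : ¬ pvSmall (l.set il (m - 1)))
    (i : Nat) (hi : i < vs.length) (hvi : vs[i] = m) : ¬ pvSmallNZ (vs.set i (vs[i] - 1)) := by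
  unfold pvSmall at hns
  push Not at hns
  obtain ⟨x, hx, y, hy, hxy⟩ := hns
  have hp1 := pvSet_perm_erase l il hil (m - 1)
  rw [hgl] at hp1
  have hp2 := pvSet_perm_erase vs i hi (m - 1)
  rw [hvi] at hp2
  have hp : List.Perm (vs.set i (m - 1)) (l.set il (m - 1)) :=
    hp2.trans (((hperm.erase m).symm.cons (m-1)).trans hp1.symm)
  rw [hvi, pvSmallNZ_perm hp]
  have hmem : ∀ z ∈ l.set il (m - 1), 1 ≤ z := by
    intro z hz
    rcases List.mem_or_eq_of_mem_set hz with hz | hz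
    · exact hall z (hperm.mem_iff.1 hz)
    · omega
  intro hsm
  exact hxy (hsm x hx (by have := hmem x hx; omega) y hy (by have := hmem y hy; omega))

theorem pvNotNZ_of_lt_max (vs : List Int) (m : Int) (hmv : m ∈ vs) (i : Nat)
    (hi : i < vs.length) (hlt : vs[i] < m) (h2i : 2 ≤ vs[i]) :
    ¬ pvSmallNZ (vs.set i (vs[i] - 1)) := by
  intro hsm
  obtain ⟨j, hj, hgj⟩ := List.mem_iff_getElem.1 hmv
  have hij : i ≠ j := by
    intro hh; subst hh; omega
  have hxm : (vs.set i (vs[i] - 1))[j]'(by simpa using hj) = m := by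
    rw [List.getElem_set_ne hij]; exact hgj
  have hmmem : m ∈ vs.set i (vs[i] - 1) := by
    rw [← hxm]; exact List.getElem_mem _
  have hdmem : vs[i] - 1 ∈ vs.set i (vs[i] - 1) := by
    refine List.mem_iff_getElem.2 ⟨i, by simpa using hi, ?_⟩
    rw [List.getElem_set]; simp
  have := hsm (vs[i] - 1) hdmem (by omega) m hmmem (by omega)
  omega

-- the decremented candidate list of B, in index form
theorem pvMap_dec (K : List Int) (hK : K.Nodup) (c : Int → Int) (j : Nat) (hj : j < K.length) :
    K.map (fun k => c k - if k = K[j] then 1 else 0) = (K.map c).set j (c K[j] - 1) := by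
  apply List.ext_getElem
  · simp
  intro t ht1 ht2
  simp only [List.getElem_map, List.getElem_set]
  have : K[t]'(by simpa using ht1) = K[j] ↔ t = j := hK.getElem_inj_iff
  by_cases h : t = j
  · subst h; simp
  · rw [if_neg (by rw [this]; omega), if_neg (by omega)]
    simp

theorem pvChain_pos (L : List Int) (b : Bool) (hs : pvSmall L) :
    (if PySem.Set.len (PySem.Set.ofList L) == 1 then true
      else if PySem.Set.len (PySem.Set.ofList L) == 0 then true else b) = true := by
  have hlen := (pvSmall_iff L).2 hs
  simp only [PySem.Set.len_eq, beq_iff_eq]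
  split_ifs with c1 c2 <;> [rfl; rfl; omega]

theorem pvChain_neg (L : List Int) (b : Bool) (hs : ¬ pvSmall L) :
    (if PySem.Set.len (PySem.Set.ofList L) == 1 then true
      else if PySem.Set.len (PySem.Set.ofList L) == 0 then true else b) = b := by
  have hlen : ¬ (PySem.Set.ofList L).length ≤ 1 := fun h => hs ((pvSmall_iff L).1 h)
  simp only [PySem.Set.len_eq, beq_iff_eq]
  split_ifs with c1 c2 <;> [omega; omega; rfl]

theorem pvIfChain (L : List Int) :
    ((if PySem.Set.len (PySem.Set.ofList L) == 1 then true
      else if PySem.Set.len (PySem.Set.ofList L) == 0 then true else false) = true)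
      ↔ pvSmall L := by
  by_cases hs : pvSmall L
  · rw [pvChain_pos L false hs]; simp [hs]
  · rw [pvChain_neg L false hs]; simp [hs]

theorem pvBoringDec_iff (l : List Int) (m : Int) (i : Nat)
    (hm : PySem.List.max? l (fun x => x) = some m) (hi : PySem.List.index? l m = some i) :
    (boringDec l = true) ↔ pvSmall (l.set i (m - 1)) := by
  obtain ⟨hik, hgi, -⟩ := PySem.List.getElem_of_index?_eq_some hi
  unfold boringDec
  simp only [hm, hi]
  have h0 : (0:Int) ≤ (i:Int) := Int.natCast_nonneg i
  have hget : PySem.List.pyGetD l (i:Int) 0 = m := by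
    rw [PySem.List.pyGetD_eq_getElem l 0 h0 (by exact_mod_cast hik)]
    simpa using hgi
  have hset : PySem.List.pySetD l (i:Int) (PySem.List.pyGetD l (i:Int) 0 - 1) = l.set i (m - 1) := by
    rw [hget, PySem.List.pySetD_of_nonneg _ _ h0]
    simp
  rw [hset]
  exact pvIfChain _

theorem pvA_values (lis : List Int) :
    (lis.foldl (fun d num => d.insert num ((PySem.List.count lis num : Int))) PySem.Dict.empty).values
      = (PySem.Set.ofList lis).map (fun k => (List.count k lis : Int)) := by
  have hkeys : (lis.foldl (fun d num => d.insert num ((PySem.List.count lis num : Int)))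
      PySem.Dict.empty).keys = PySem.Set.ofList lis := by
    have := PySem.Dict.keys_foldl_insert lis
      (fun _ x => ((PySem.List.count lis x : Int))) PySem.Dict.empty
    simpa [PySem.Set.update_nil_left] using this
  have hnod := hkeys ▸ PySem.Set.nodup_ofList lis
  rw [PySem.Dict.values_eq_map_keys _ hnod 0, hkeys]
  apply List.map_congr_left
  intro k hk
  have hkmem : k ∈ lis := (PySem.Set.mem_ofList lis k).1 hk
  rw [pvGetD_foldl_insert_const]
  simp [hkmem, PySem.List.count_eq]

theorem pvAlt_iff (lis : List Int) :
    boring_alt lis = true ↔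
      (lis = [] ∨ pvB ((PySem.Set.ofList lis).map (fun k => (List.count k lis : Int)))) := by
  unfold boring_alt
  have hkeys : (lis.foldl (fun d x => d.insert x (d.getD x 0 + 1)) (PySem.Dict.empty : PySem.Dict Int Int)).keys
      = PySem.Set.ofList lis := by
    have := PySem.Dict.keys_foldl_insert lis
      (fun (d : PySem.Dict Int Int) x => d.getD x 0 + 1) PySem.Dict.empty
    simpa [PySem.Set.update_nil_left] using this
  have hgetD : ∀ k, (lis.foldl (fun d x => d.insert x (d.getD x 0 + 1)) (PySem.Dict.empty : PySem.Dict Int Int)).getD k 0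
      = (List.count k lis : Int) := by
    intro k
    rw [PySem.Dict.getD_foldl_insert_add_one]
    simp
  have hlist : ∀ v : Int,
      ((PySem.Set.ofList lis).map
        (fun k => (lis.foldl (fun d x => d.insert x (d.getD x 0 + 1)) (PySem.Dict.empty : PySem.Dict Int Int)).getD k 0
          - if k == v then 1 else 0))
      = (PySem.Set.ofList lis).map
          (fun k => (List.count k lis : Int) - if k = v then 1 else 0) := by
    intro v
    apply List.map_congr_left
    intro k _
    rw [hgetD]
    simp [beq_iff_eq]
  by_cases he : lis = []
  · simp [he]
  · rw [if_neg (by simpa [List.isEmpty_iff] using he)]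
    rw [List.any_eq_true]
    have hnodK := PySem.Set.nodup_ofList lis
    constructor
    · rintro ⟨v, hv, hb⟩
      right
      rw [hkeys] at hv
      simp only [hkeys, hlist v, PySem.Set.len_eq, decide_eq_true_eq] at hb
      obtain ⟨j, hj, hgj⟩ := List.mem_iff_getElem.1 hv
      refine ⟨j, by simpa using hj, ?_⟩
      rw [← hgj] at hb
      rw [pvMap_dec (PySem.Set.ofList lis) hnodK (fun k => (List.count k lis : Int)) j hj] at hb
      have hb' := (pvSmallNZ_iff _).1 (by exact_mod_cast hb)
      simpa [List.getElem_map] using hb'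
    · rintro (he' | ⟨j, hj, hnz⟩)
      · exact absurd he' he
      have hj' : j < (PySem.Set.ofList lis).length := by simpa using hj
      refine ⟨(PySem.Set.ofList lis)[j]'hj', by rw [hkeys]; exact List.getElem_mem _, ?_⟩
      simp only [hkeys, hlist ((PySem.Set.ofList lis)[j]'hj'), PySem.Set.len_eq,
        decide_eq_true_eq]
      rw [pvMap_dec (PySem.Set.ofList lis) hnodK (fun k => (List.count k lis : Int)) j hj']
      have hnz' : pvSmallNZ (((PySem.Set.ofList lis).map (fun k => (List.count k lis : Int))).set j
          ((List.count ((PySem.Set.ofList lis)[j]'hj') lis : Int) - 1)) := by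
        simpa [List.getElem_map] using hnz
      exact_mod_cast (pvSmallNZ_iff _).2 hnz'

theorem pvCount_ge_two_of_not_nodup (lis : List Int) (hnd : ¬ lis.Nodup) :
    ∃ a ∈ lis, 2 ≤ List.count a lis := by
  rw [List.nodup_iff_count_le_one] at hnd
  push Not at hnd
  obtain ⟨a, ha⟩ := hnd
  exact ⟨a, List.count_pos_iff.1 (by omega), by omega⟩

theorem pvMain (lis : List Int) : boring lis = boring_alt lis := by
  rw [Bool.eq_iff_iff, pvAlt_iff]
  unfold boring
  simp only [pvA_values]
  by_cases hnd : lis.Nodup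
  · have hK : PySem.Set.ofList lis = lis := PySem.Set.ofList_eq_self_of_nodup lis hnd
    rw [if_pos (by simp [PySem.Set.len_eq, hK])]
    refine iff_of_true rfl ?_
    by_cases he : lis = []
    · exact Or.inl he
    · right
      rw [hK]
      have hlen : 0 < lis.length := List.length_pos_iff.2 he
      have hcount1 : ∀ k ∈ lis, (List.count k lis : Int) = 1 := by
        intro k hk
        have h1 := List.nodup_iff_count_le_one.1 hnd k
        have h2 := List.count_pos_iff.2 hk
        exact_mod_cast by omega
      unfold pvB
      refine ⟨0, by simpa using hlen, ?_⟩
      intro x hx hx0 y hy hy0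
      have hval : ∀ z, z ∈ (lis.map (fun k => (List.count k lis : Int))).set 0
          ((lis.map (fun k => (List.count k lis : Int)))[0]'(by simpa using hlen) - 1) →
          z ≠ 0 → z = 1 := by
        intro z hz hz0
        rcases List.mem_or_eq_of_mem_set hz with hz | hz
        · obtain ⟨k, hk, rfl⟩ := List.mem_map.1 hz
          exact hcount1 k hk
        · rw [List.getElem_map, hcount1 _ (List.getElem_mem _)] at hz
          omega
      rw [hval x hx hx0, hval y hy hy0]
  · have hlenne : (PySem.Set.ofList lis).length ≠ lis.length :=
      fun h => hnd (pvNodup_of_len lis h)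
    rw [if_neg (by simp only [PySem.Set.len_eq, beq_iff_eq]; exact_mod_cast hlenne)]
    have hne : lis ≠ [] := by rintro rfl; exact hnd List.nodup_nil
    rw [or_iff_right hne]
    set vs := (PySem.Set.ofList lis).map (fun k => (List.count k lis : Int)) with hvs
    have h1 : ∀ x ∈ vs, 1 ≤ x := by
      intro x hx
      obtain ⟨k, hk, rfl⟩ := List.mem_map.1 hx
      have := List.count_pos_iff.2 ((PySem.Set.mem_ofList lis k).1 hk)
      exact_mod_cast this
    obtain ⟨a, hal, ha2⟩ := pvCount_ge_two_of_not_nodup lis hnd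
    have h2 : ∃ x ∈ vs, 2 ≤ x := by
      refine ⟨(List.count a lis : Int), List.mem_map.2 ⟨a, (PySem.Set.mem_ofList lis a).2 hal, rfl⟩,
        by exact_mod_cast ha2⟩
    have hvne : vs ≠ [] := by
      intro h
      rw [h] at h2
      simp at h2
    by_cases hm1 : (1:Int) ∈ vs
    · rw [if_pos (by simpa using hm1)]
      simp only [PySem.List.remove?_eq_some_erase vs 1 hm1]
      by_cases hs1 : pvSmall (vs.erase 1)
      · rw [pvChain_pos _ _ hs1]
        exact iff_of_true rfl (pvB_of_small_erase vs hm1 hs1)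
      · rw [pvChain_neg _ _ hs1]
        have hlperm : List.Perm (vs.erase 1 ++ [1]) vs :=
          (List.perm_append_singleton 1 (vs.erase 1)).trans (List.perm_cons_erase hm1).symm
        rcases hmm : PySem.List.max? (vs.erase 1 ++ [1]) (fun x => x) with _ | m
        · rw [PySem.List.max?_eq_none_iff] at hmm
          simp at hmm
        have hmem := PySem.List.max?_mem hmm
        have hmax := PySem.List.max?_isMax hmm
        rcases hii : PySem.List.index? (vs.erase 1 ++ [1]) m with _ | i
        · rw [PySem.List.index?_eq_none_iff] at hii
          exact absurd hmem hii
        obtain ⟨hik, hgi, -⟩ := PySem.List.getElem_of_index?_eq_some hii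
        rw [pvBoringDec_iff _ m i hmm hii]
        have hm2 : 2 ≤ m := by
          obtain ⟨x, hx, h2x⟩ := h2
          exact le_trans h2x (hmax x (hlperm.mem_iff.2 hx))
        constructor
        · exact fun hsml => pvB_of_dec vs _ hlperm m i hik hgi hsml
        · intro hb
          by_contra hns
          obtain ⟨i', hi', hnz⟩ := hb
          by_cases h1' : vs[i']'hi' = 1
          · exact pvNotNZ_of_not_small_erase vs i' hi' h1' h1 hs1 hnz
          · have h2i' : 2 ≤ vs[i']'hi' := by
              have := h1 _ (List.getElem_mem hi')
              omega
            have hle : vs[i']'hi' ≤ m := hmax _ (hlperm.mem_iff.2 (List.getElem_mem hi'))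
            rcases eq_or_lt_of_le hle with heq | hlt
            · exact pvNotNZ_of_not_small_decmax vs _ hlperm m i hik hgi hm2 h1 hns i' hi' heq hnz
            · exact pvNotNZ_of_lt_max vs m (hlperm.mem_iff.1 hmem) i' hi' hlt h2i' hnz
    · rw [if_neg (by simpa using hm1)]
      rcases hmm : PySem.List.max? vs (fun x => x) with _ | m
      · rw [PySem.List.max?_eq_none_iff] at hmm
        exact absurd hmm hvne
      have hmem := PySem.List.max?_mem hmm
      have hmax := PySem.List.max?_isMax hmm
      rcases hii : PySem.List.index? vs m with _ | i
      · rw [PySem.List.index?_eq_none_iff] at hii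
        exact absurd hmem hii
      obtain ⟨hik, hgi, -⟩ := PySem.List.getElem_of_index?_eq_some hii
      rw [pvBoringDec_iff _ m i hmm hii]
      have hm2 : 2 ≤ m := by
        obtain ⟨x, hx, h2x⟩ := h2
        exact le_trans h2x (hmax x hx)
      constructor
      · exact fun hsml => pvB_of_dec vs vs (List.Perm.refl vs) m i hik hgi hsml
      · intro hb
        by_contra hns
        obtain ⟨i', hi', hnz⟩ := hb
        have h1' : vs[i']'hi' ≠ 1 := by
          intro hh
          exact hm1 (hh ▸ List.getElem_mem hi')
        have h2i' : 2 ≤ vs[i']'hi' := by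
          have := h1 _ (List.getElem_mem hi')
          omega
        have hle : vs[i']'hi' ≤ m := hmax _ (List.getElem_mem hi')
        rcases eq_or_lt_of_le hle with heq | hlt
        · exact pvNotNZ_of_not_small_decmax vs vs (List.Perm.refl vs) m i hik hgi hm2 h1 hns i' hi' heq hnz
        · exact pvNotNZ_of_lt_max vs m hmem i' hi' hlt h2i' hnz

-- ===== VERDICT (by name: the statement is the Claim_ definition above) =====
theorem boring_spec : Claim_equal_boring := by
  intro lis _
  unfold Spec_boring
  exact pvMain lis
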